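-- pv_equiv track=rewrite | github.com/Thrigger/advent_of_code | 2021/python/d18.py | get_max_dept
-- ===== SOURCE A (Python) =====
-- def get_max_dept(number):
--     dep = 0
--     max_dep = 0
--     for each in number:
--         if each == "[":
--             dep += 1
--             if dep > max_dep:
--                 max_dep = dep
--         elif each == "]":
--             dep -= 1
--     return max_dep
-- ===== SOURCE B (Python) =====
-- def get_max_dept(number):
--     # Divide and conquer: each segment is summarized by (m, b) where
--     # m = max bracket depth reached inside the segment (floored at 0, relative
--     # to depth 0 at its start) and b = its net bracket balance. Two adjacent
--     # summaries combine as (max(m1, b1 + m2), b1 + b2).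
--     def solve(lo, hi):
--         if hi - lo <= 1:
--             if hi - lo == 0:
--                 return (0, 0)
--             c = number[lo]
--             if c == "[":
--                 return (1, 1)
--             if c == "]":
--                 return (0, -1)
--             return (0, 0)
--         mid = (lo + hi) // 2
--         m1, b1 = solve(lo, mid)
--         m2, b2 = solve(mid, hi)
--         return (max(m1, b1 + m2), b1 + b2)
--     return solve(0, len(number))[0]
-- ===== Notes on version B (the rewrite author's own statement) =====
-- stated objective: alternative
-- what changed: Replaces A's sequential left-to-right scan carrying (depth, max) state with a divide-and-conquer over string halves: each segment is summarized by the pair (max relative depth floored at 0, net balance), and summaries are combined with (max(m1, b1+m2), b1+b2).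
import Mathlib
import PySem

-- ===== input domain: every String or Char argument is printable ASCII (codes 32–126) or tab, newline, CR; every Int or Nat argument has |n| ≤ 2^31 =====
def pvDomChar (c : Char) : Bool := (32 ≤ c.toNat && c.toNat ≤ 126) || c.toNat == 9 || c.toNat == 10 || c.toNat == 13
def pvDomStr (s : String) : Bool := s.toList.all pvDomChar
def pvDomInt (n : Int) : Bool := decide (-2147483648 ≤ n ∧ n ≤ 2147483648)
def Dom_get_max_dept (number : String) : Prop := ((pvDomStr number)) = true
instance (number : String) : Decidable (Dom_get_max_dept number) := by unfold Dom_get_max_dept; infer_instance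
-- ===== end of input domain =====

-- B replaces A's sequential (depth, max) scan with a divide-and-conquer over halves,
-- combining segment summaries (max relative depth floored at 0, net balance); same O(n) cost.

-- ===== PORT A =====
-- A's loop body (dep, max_dep updated per character)
def pvStepA (s : Int × Int) (each : Char) : Int × Int :=
  if each = '[' then
    let dep := s.1 + 1
    (dep, if dep > s.2 then dep else s.2)
  else if each = ']' then (s.1 - 1, s.2)
  else s

def get_max_dept (number : String) : Int :=
  (number.toList.foldl pvStepA (0, 0)).2

-- ===== PORT B =====
-- Source B's solve(lo, hi) works on the slice number[lo:hi]; the port recurses on that slice,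
-- with a fuel parameter (= the slice length at the top call) making the recursion structural.
def pvSolve (fuel : Nat) (l : List Char) : Int × Int :=
  if l.length ≤ 1 then
    match l with
    | [] => (0, 0)
    | c :: _ =>
      if c = '[' then (1, 1) else if c = ']' then (0, -1) else (0, 0)
  else
    match fuel with
    | 0 => (0, 0)  -- unreachable when fuel ≥ l.length
    | n + 1 =>
      let mid := l.length / 2
      let p1 := pvSolve n (l.take mid)
      let p2 := pvSolve n (l.drop mid)
      (max p1.1 (p1.2 + p2.1), p1.2 + p2.2)

def get_max_dept_alt (number : String) : Int :=
  (pvSolve number.toList.length number.toList).1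

-- ===== PRECONDITION & SPEC =====
def Spec_get_max_dept (number : String) (out : Int) : Prop := out = get_max_dept_alt number
instance (number : String) (out : Int) : Decidable (Spec_get_max_dept number out) := by unfold Spec_get_max_dept; infer_instance

-- ===== CLAIM (what is proved, stated in full; the proofs are below) =====
def Claim_equal_get_max_dept : Prop := ∀ (number : String), Dom_get_max_dept number → Spec_get_max_dept number (get_max_dept number)

-- ===== LEMMAS AND PROOFS =====

def pvDelta (c : Char) : Int := if c = '[' then 1 else if c = ']' then -1 else 0

-- max prefix-balance of l, floored at 0 (the common value of both ports)
def pvP : List Char → Int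
  | [] => 0
  | c :: cs => max 0 (pvDelta c + pvP cs)

-- net balance of l
def pvS : List Char → Int
  | [] => 0
  | c :: cs => pvDelta c + pvS cs

theorem pvP_nonneg (l : List Char) : 0 ≤ pvP l := by
  cases l with
  | nil => simp [pvP]
  | cons c cs => exact le_max_left _ _

theorem pvS_append (l₁ l₂ : List Char) : pvS (l₁ ++ l₂) = pvS l₁ + pvS l₂ := by
  induction l₁ with
  | nil => simp [pvS]
  | cons c cs ih => simp [pvS, ih]; ring

theorem pvP_append (l₁ l₂ : List Char) :
    pvP (l₁ ++ l₂) = max (pvP l₁) (pvS l₁ + pvP l₂) := by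
  induction l₁ with
  | nil => have := pvP_nonneg l₂; simp [pvP, pvS]; omega
  | cons c cs ih =>
    simp only [List.cons_append, pvP, pvS, ih]
    omega

theorem pvSolve_eq_aux (n : Nat) : ∀ (l : List Char), l.length ≤ n + 1 → pvSolve n l = (pvP l, pvS l) := by
  induction n with
  | zero =>
    intro l hl
    match l, hl with
    | [], _ => simp [pvSolve, pvP, pvS]
    | [c], _ =>
      by_cases h1 : c = '['
      · simp [pvSolve, pvP, pvS, pvDelta, h1]
      · by_cases h2 : c = ']'
        · simp [pvSolve, pvP, pvS, pvDelta, h2]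
        · simp [pvSolve, pvP, pvS, pvDelta, h1, h2]
  | succ n ih =>
    intro l hl
    rw [pvSolve.eq_def]
    by_cases h : l.length ≤ 1
    · rw [if_pos h]
      match l, h with
      | [], _ => simp [pvP, pvS]
      | [c], _ =>
        by_cases h1 : c = '['
        · simp [pvP, pvS, pvDelta, h1]
        · by_cases h2 : c = ']'
          · simp [pvP, pvS, pvDelta, h2]
          · simp [pvP, pvS, pvDelta, h1, h2]
    · simp only [if_neg h]
      have h2 : 2 ≤ l.length := by omega
      have ht : (l.take (l.length / 2)).length ≤ n + 1 := by simp [List.length_take]; omega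
      have hd : (l.drop (l.length / 2)).length ≤ n + 1 := by simp [List.length_drop]; omega
      rw [ih _ ht, ih _ hd]
      have hsplit : l.take (l.length / 2) ++ l.drop (l.length / 2) = l := List.take_append_drop _ _
      rw [show pvP l = pvP (l.take (l.length / 2) ++ l.drop (l.length / 2)) by rw [hsplit],
          show pvS l = pvS (l.take (l.length / 2) ++ l.drop (l.length / 2)) by rw [hsplit],
          pvP_append, pvS_append]

theorem pvSolve_eq (l : List Char) : pvSolve l.length l = (pvP l, pvS l) :=
  pvSolve_eq_aux l.length l (Nat.le_succ_of_le le_rfl)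

theorem pvLoopA_eq (l : List Char) (d m : Int) (h : d ≤ m) :
    (l.foldl pvStepA (d, m)).2 = max m (d + pvP l) := by
  induction l generalizing d m with
  | nil => simp [pvP]; omega
  | cons c cs ih =>
    have hn := pvP_nonneg cs
    by_cases h1 : c = '['
    · subst h1
      simp only [List.foldl, pvStepA, Char.reduceEq, reduceIte]
      rw [ih (d + 1) (if d + 1 > m then d + 1 else m) (by split <;> omega)]
      simp only [pvP, pvDelta, Char.reduceEq, reduceIte]
      split <;> omega
    · by_cases h2 : c = ']'
      · subst h2
        simp only [List.foldl, pvStepA, Char.reduceEq, reduceIte]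
        rw [ih (d - 1) m (by omega)]
        simp only [pvP, pvDelta, Char.reduceEq, reduceIte]
        omega
      · simp only [List.foldl, pvStepA, if_neg h1, if_neg h2]
        rw [ih d m h]
        simp only [pvP, pvDelta, if_neg h1, if_neg h2]
        omega

-- ===== VERDICT (by name: the statement is the Claim_ definition above) =====
theorem get_max_dept_spec : Claim_equal_get_max_dept := by
  intro number _
  unfold Spec_get_max_dept get_max_dept get_max_dept_alt
  rw [pvSolve_eq, pvLoopA_eq number.toList 0 0 le_rfl]
  have := pvP_nonneg number.toList
  simp; omega
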